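-- pv_equiv track=rewrite | github.com/nishantchauhan00/GeeksForGeeks | Companies Question/22 Segregate Even and Odd numbers.py | solver1
-- ===== SOURCE A (Python) =====
-- def solver1(arr, n):
--     # its expensive, beacause inserting in between of array/list is expensive
--     # operation
--     evenarr = []
--     oddarr = []
--
--     for i in range(n):
--         if arr[i] % 2 is 0:  # Even
--             e = len(evenarr) - 1
--             while e >= 0 and evenarr[e] > arr[i]:
--                 e -= 1
--             evenarr.insert(e+1, arr[i])
--         else:  # odd
--             o = len(oddarr) - 1
--             while o >= 0 and oddarr[o] > arr[i]:
--                 o -= 1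
--             oddarr.insert(o+1, arr[i])
--
--     evenarr.extend(oddarr)
--     return evenarr
-- ===== SOURCE B (Python) =====
-- def solver1(arr, n):
--     data = [arr[i] for i in range(n)]
--     return sorted(data, key=lambda x: (0 if x % 2 == 0 else 1, x))
-- ===== Notes on version B (the rewrite author's own statement) =====
-- stated objective: idiomatic
-- what changed: A single stable sort of the collected elements with a composite (parity, value) key replaces A's two hand-maintained insertion-sorted bucket lists with their backward scan-and-insert loops.
import Mathlib
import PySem

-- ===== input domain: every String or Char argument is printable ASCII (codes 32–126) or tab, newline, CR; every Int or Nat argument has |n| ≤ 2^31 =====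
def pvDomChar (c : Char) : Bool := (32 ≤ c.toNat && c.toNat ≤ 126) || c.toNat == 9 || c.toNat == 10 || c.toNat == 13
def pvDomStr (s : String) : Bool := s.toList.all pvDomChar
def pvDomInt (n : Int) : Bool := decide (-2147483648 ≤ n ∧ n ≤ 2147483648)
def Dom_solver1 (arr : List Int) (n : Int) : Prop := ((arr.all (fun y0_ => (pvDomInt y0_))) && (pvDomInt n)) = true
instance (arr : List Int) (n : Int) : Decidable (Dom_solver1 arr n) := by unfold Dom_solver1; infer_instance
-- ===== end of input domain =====

-- B replaces A's two hand-maintained insertion-sorted buckets by one stable sort with a (parity, value) key.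

-- ===== PORT A =====
-- the backward while-loop 'e = len(l)-1; while e >= 0 and l[e] > x: e -= 1'; returns e+1 (the insert position)
def aScan (l : List Int) (x : Int) : Nat → Nat
  | 0 => 0
  | e + 1 => if l.getD e 0 > x then aScan l x e else e + 1

-- 'l.insert(e+1, x)' after the scan
def aInsert (l : List Int) (x : Int) : List Int :=
  PySem.List.insert l ((aScan l x l.length : Nat) : Int) x

def solver1 (arr : List Int) (n : Int) : List Int :=
  let st := (PySem.List.pyRange 0 n 1).foldl
    (fun (st : List Int × List Int) i =>
      if PySem.Int.mod (PySem.List.pyGetD arr i 0) 2 == 0 then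
        (aInsert st.1 (PySem.List.pyGetD arr i 0), st.2)
      else
        (st.1, aInsert st.2 (PySem.List.pyGetD arr i 0)))
    ([], [])
  st.1 ++ st.2

-- ===== PORT B =====
def solver1_alt (arr : List Int) (n : Int) : List Int :=
  let data := (PySem.List.pyRange 0 n 1).map (fun i => PySem.List.pyGetD arr i 0)
  PySem.List.sorted2 data (fun x => if PySem.Int.mod x 2 == 0 then (0 : Int) else 1) (fun x => x)

-- ===== PRECONDITION & SPEC =====
-- Pre_ excludes exactly the inputs where Python A raises IndexError (arr[i] with i in range(n) and n > len(arr)).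
def Pre_solver1 (arr : List Int) (n : Int) : Prop := n ≤ (arr.length : Int)
instance (arr : List Int) (n : Int) : Decidable (Pre_solver1 arr n) := by unfold Pre_solver1; infer_instance
def pvWitness_solver1 : List Int × Int := ([3, 2, 5, 4], 4)

def Spec_solver1 (arr : List Int) (n : Int) (out : List Int) : Prop := out = solver1_alt arr n
instance (arr : List Int) (n : Int) (out : List Int) : Decidable (Spec_solver1 arr n out) := by unfold Spec_solver1; infer_instance

-- ===== CLAIM (what is proved, stated in full; the proofs are below) =====
def Claim_equal_solver1 : Prop := ∀ (arr : List Int) (n : Int), Dom_solver1 arr n → Pre_solver1 arr n → Spec_solver1 arr n (solver1 arr n)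

-- ===== LEMMAS AND PROOFS =====

-- proof-side abbreviations: value comparison, B's first key, and B's lexicographic tuple comparison
def ltv : Int → Int → Bool := fun a b => decide (a < b)
def k1 (x : Int) : Int := if PySem.Int.mod x 2 == 0 then 0 else 1
def lexB : Int → Int → Bool := fun a b => decide (k1 a < k1 b) || (!decide (k1 b < k1 a) && decide (a < b))

lemma sorted2_eq_foldl (data : List Int) :
    PySem.List.sorted2 data (fun x => if PySem.Int.mod x 2 == 0 then (0 : Int) else 1) (fun x => x) =
      data.foldl (fun acc x => PySem.List.insertBy lexB x acc) [] := rfl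

lemma insertBy_eq_takeWhile (b : Int → Int → Bool) (x : Int) (l : List Int) :
    PySem.List.insertBy b x l =
      l.takeWhile (fun y => !b x y) ++ x :: l.dropWhile (fun y => !b x y) := by
  induction l with
  | nil => rfl
  | cons y ys ih =>
    by_cases h : b x y
    · simp [PySem.List.insertBy, h]
    · simp [PySem.List.insertBy, h, ih]

lemma aScan_append (l t : List Int) (x : Int) : ∀ (k : Nat), k ≤ l.length →
    aScan (l ++ t) x k = aScan l x k := by
  intro k
  induction k with
  | zero => intro _; rfl
  | succ e ih =>
    intro hk
    have he : e < l.length := by omega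
    have : (l ++ t).getD e 0 = l.getD e 0 := by
      simp [List.getD, List.getElem?_append_left he]
    simp only [aScan, this]
    split
    · exact ih (by omega)
    · rfl

lemma aScan_eq_takeWhile (l : List Int) (x : Int) (hs : l.Pairwise (· ≤ ·)) :
    aScan l x l.length = (l.takeWhile (fun y => !ltv x y)).length := by
  induction l using List.reverseRecOn with
  | nil => rfl
  | append_singleton l' a ih =>
    have hs' : l'.Pairwise (· ≤ ·) := (List.pairwise_append.mp hs).1
    have hla : ∀ y ∈ l', y ≤ a := by
      intro y hy
      exact (List.pairwise_append.mp hs).2.2 y hy a (by simp)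
    have hlen : (l' ++ [a]).length = l'.length + 1 := by simp
    rw [hlen]
    have hget : (l' ++ [a]).getD l'.length 0 = a := by
      simp [List.getD]
    simp only [aScan, hget]
    by_cases h : a > x
    · simp only [h, if_true]
      rw [aScan_append l' [a] x l'.length le_rfl, ih hs']
      rw [List.takeWhile_append]
      split
      · next hall =>
        have : (fun y => !ltv x y) a = false := by simp [ltv]; omega
        simp [this, hall]
      · rfl
    · simp only [h, if_false]
      have hall : ∀ y ∈ l' ++ [a], (fun y => !ltv x y) y = true := by
        intro y hy
        simp [ltv]
        rcases List.mem_append.mp hy with h1 | h1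
        · have := hla y h1; omega
        · simp at h1; omega
      rw [List.takeWhile_eq_self_iff.mpr hall]
      simp

lemma aInsert_eq_insertBy (l : List Int) (x : Int) (hs : l.Pairwise (· ≤ ·)) :
    aInsert l x = PySem.List.insertBy ltv x l := by
  rw [insertBy_eq_takeWhile]
  unfold aInsert
  rw [aScan_eq_takeWhile l x hs]
  rw [PySem.List.insert_natCast _ _ _ (List.IsPrefix.length_le (List.takeWhile_prefix _))]
  have hTD := List.takeWhile_append_dropWhile (p := fun y => !ltv x y) (l := l)
  generalize hT : List.takeWhile (fun y => !ltv x y) l = T at *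
  generalize hD : List.dropWhile (fun y => !ltv x y) l = D at *
  rw [← hTD, List.take_left' rfl, List.drop_left' rfl]

lemma pairwise_insertBy (x : Int) (l : List Int) (h : l.Pairwise (· ≤ ·)) :
    (PySem.List.insertBy ltv x l).Pairwise (· ≤ ·) := by
  induction l with
  | nil => simp [PySem.List.insertBy]
  | cons y ys ih =>
    rw [List.pairwise_cons] at h
    by_cases hb : ltv x y
    · have hxy : x < y := by simpa [ltv] using hb
      simp only [PySem.List.insertBy, hb, if_true]
      refine List.pairwise_cons.mpr ⟨?_, List.pairwise_cons.mpr h⟩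
      intro z hz
      rcases List.mem_cons.mp hz with rfl | hz'
      · omega
      · exact le_trans (le_of_lt hxy) (h.1 z hz')
    · have hyx : y ≤ x := by simp [ltv] at hb; omega
      simp only [PySem.List.insertBy, hb]
      refine List.pairwise_cons.mpr ⟨?_, ih h.2⟩
      intro z hz
      rcases (PySem.List.mem_insertBy ltv x z ys).mp hz with rfl | hz'
      · exact hyx
      · exact h.1 z hz'

lemma insertBy_lex_congr (x : Int) (l : List Int) (h : ∀ y ∈ l, k1 y = k1 x) :
    PySem.List.insertBy lexB x l = PySem.List.insertBy ltv x l := by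
  induction l with
  | nil => rfl
  | cons y ys ih =>
    have hk : k1 y = k1 x := h y (by simp)
    have hb : lexB x y = ltv x y := by simp [lexB, ltv, hk]
    simp only [PySem.List.insertBy, hb]
    split
    · rfl
    · rw [ih (fun z hz => h z (by simp [hz]))]

lemma insertBy_lex_even (x : Int) (E O : List Int) (hx : k1 x = 0)
    (hE : ∀ e ∈ E, k1 e = 0) (hO : ∀ o ∈ O, k1 o = 1) :
    PySem.List.insertBy lexB x (E ++ O) = PySem.List.insertBy ltv x E ++ O := by
  induction E with
  | nil =>
    cases O with
    | nil => rfl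
    | cons o os =>
      have : lexB x o = true := by
        have := hO o (by simp)
        simp [lexB, this, hx]
      simp [PySem.List.insertBy, this]
  | cons e E' ih =>
    have hk : k1 e = k1 x := by rw [hE e (by simp), hx]
    have hb : lexB x e = ltv x e := by simp [lexB, ltv, hk]
    simp only [List.cons_append, PySem.List.insertBy, hb]
    split
    · rfl
    · rw [ih (fun z hz => hE z (by simp [hz]))]; rfl

lemma insertBy_lex_odd (x : Int) (E O : List Int) (hx : k1 x = 1)
    (hE : ∀ e ∈ E, k1 e = 0) (hO : ∀ o ∈ O, k1 o = 1) :
    PySem.List.insertBy lexB x (E ++ O) = E ++ PySem.List.insertBy ltv x O := by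
  induction E with
  | nil =>
    simp only [List.nil_append]
    exact insertBy_lex_congr x O (fun y hy => by rw [hO y hy, hx])
  | cons e E' ih =>
    have hb : lexB x e = false := by
      have := hE e (by simp)
      simp [lexB, this, hx]
    simp only [List.cons_append, PySem.List.insertBy, hb]
    simp only [Bool.false_eq_true, if_false]
    rw [ih (fun z hz => hE z (by simp [hz]))]

lemma main_inv (data : List Int) : ∀ (E O : List Int),
    E.Pairwise (· ≤ ·) → O.Pairwise (· ≤ ·) →
    (∀ e ∈ E, k1 e = 0) → (∀ o ∈ O, k1 o = 1) →
    data.foldl (fun acc x => PySem.List.insertBy lexB x acc) (E ++ O) =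
      (data.foldl (fun st x =>
          if PySem.Int.mod x 2 == 0 then (aInsert st.1 x, st.2) else (st.1, aInsert st.2 x))
        (E, O)).1 ++
      (data.foldl (fun st x =>
          if PySem.Int.mod x 2 == 0 then (aInsert st.1 x, st.2) else (st.1, aInsert st.2 x))
        (E, O)).2 := by
  induction data with
  | nil => intro E O _ _ _ _; rfl
  | cons x xs ih =>
    intro E O hE hO hkE hkO
    simp only [List.foldl_cons]
    by_cases hx : PySem.Int.mod x 2 == 0
    · have hk : k1 x = 0 := by unfold k1; rw [hx]; simp
      rw [insertBy_lex_even x E O hk hkE hkO, ← aInsert_eq_insertBy E x hE]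
      simp only [hx, if_true]
      exact ih (aInsert E x) O
        (by rw [aInsert_eq_insertBy E x hE]; exact pairwise_insertBy x E hE)
        hO
        (by
          intro e he
          rw [aInsert_eq_insertBy E x hE] at he
          rcases (PySem.List.mem_insertBy ltv x e E).mp he with rfl | he'
          · exact hk
          · exact hkE e he')
        hkO
    · have hx' : (PySem.Int.mod x 2 == 0) = false := by
        rw [Bool.not_eq_true] at hx; exact hx
      have hk : k1 x = 1 := by unfold k1; rw [hx']; simp
      rw [insertBy_lex_odd x E O hk hkE hkO, ← aInsert_eq_insertBy O x hO]
      simp only [hx]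
      exact ih E (aInsert O x)
        hE
        (by rw [aInsert_eq_insertBy O x hO]; exact pairwise_insertBy x O hO)
        hkE
        (by
          intro o ho
          rw [aInsert_eq_insertBy O x hO] at ho
          rcases (PySem.List.mem_insertBy ltv x o O).mp ho with rfl | ho'
          · exact hk
          · exact hkO o ho')

-- ===== VERDICT (by name: the statement is the Claim_ definition above) =====
theorem solver1_spec : Claim_equal_solver1 := by
  intro arr n _ _
  show solver1 arr n = solver1_alt arr n
  unfold solver1 solver1_alt
  rw [sorted2_eq_foldl, List.foldl_map]
  have h := main_inv ((PySem.List.pyRange 0 n 1).map (fun i => PySem.List.pyGetD arr i 0)) [] []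
    (by simp) (by simp) (by simp) (by simp)
  rw [List.foldl_map, List.foldl_map] at h
  exact h.symm
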